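-- pv_equiv track=rewrite | github.com/Someshwar54/biomlstudio | backend/app/services/dna_ml_models.py | _analyze_orfs
-- ===== SOURCE A (Python) =====
-- from typing import Dict, List, Tuple, Any, Optional
--
-- def _analyze_orfs(sequence: str) -> Tuple[int, int]:
--     """Analyze Open Reading Frames"""
--     start_codons = ['ATG']
--     stop_codons = ['TAA', 'TAG', 'TGA']
--
--     max_orf_length = 0
--     num_orfs = 0
--
--     for frame in range(3):
--         frame_seq = sequence[frame:]
--
--         i = 0
--         while i < len(frame_seq) - 2:
--             codon = frame_seq[i:i+3]
--             if len(codon) == 3 and codon in start_codons: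
--                 # Look for stop codon
--                 j = i + 3
--                 while j < len(frame_seq) - 2:
--                     stop_codon = frame_seq[j:j+3]
--                     if len(stop_codon) == 3 and stop_codon in stop_codons:
--                         orf_length = j - i + 3
--                         max_orf_length = max(max_orf_length, orf_length)
--                         num_orfs += 1
--                         i = j + 3
--                         break
--                     j += 3
--                 else:
--                     i += 3
--             else:
--                 i += 3
--
--     return max_orf_length, num_orfs
-- ===== SOURCE B (Python) =====
-- def _analyze_orfs(sequence: str):
--     """Analyze Open Reading Frames: single linear codon-by-codon pass per frame
--     with a start/stop state machine (no inner rescan)."""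
--     stop_codons = ('TAA', 'TAG', 'TGA')
--
--     max_orf_length = 0
--     num_orfs = 0
--
--     for frame in range(3):
--         frame_seq = sequence[frame:]
--         start = None  # position of the opening ATG of the current ORF, if any
--         for i in range(0, len(frame_seq) - 2, 3):
--             codon = frame_seq[i:i+3]
--             if start is None:
--                 if codon == 'ATG':
--                     start = i
--             elif codon in stop_codons:
--                 num_orfs += 1
--                 max_orf_length = max(max_orf_length, i - start + 3)
--                 start = None
--
--     return max_orf_length, num_orfs
-- ===== Notes on version B (the rewrite author's own statement) =====
-- stated objective: faster
-- what changed: A rescans ahead for a stop codon from every ATG (re-walking the same codons after an unmatched ATG); B makes one linear codon-by-codon pass per frame with a start/stop state machine that remembers the open ORF's start, so no codon is visited twice.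
import Mathlib
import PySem

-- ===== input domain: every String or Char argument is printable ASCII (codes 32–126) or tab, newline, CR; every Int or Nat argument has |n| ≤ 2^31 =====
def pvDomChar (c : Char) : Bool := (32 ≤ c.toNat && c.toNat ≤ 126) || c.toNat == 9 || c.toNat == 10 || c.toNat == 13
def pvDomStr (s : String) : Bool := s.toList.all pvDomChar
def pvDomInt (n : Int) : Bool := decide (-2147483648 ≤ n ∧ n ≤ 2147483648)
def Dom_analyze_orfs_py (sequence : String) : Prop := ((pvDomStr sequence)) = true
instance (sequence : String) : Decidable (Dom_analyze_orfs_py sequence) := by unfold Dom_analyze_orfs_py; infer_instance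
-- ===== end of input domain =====

-- B replaces A's rescan-for-stop inner loop by a single linear codon pass per frame
-- with a start/stop state machine (objective: faster, asymptotic).
-- A mutates nothing; equivalence is about the return value (a pair, ported as [max, num]).

-- ===== PORT A =====
-- termination facts for the index loops (cited by name in decreasing_by)
theorem pv_dec1 (len i : Nat) (h : i + 2 < len) : len - (i + 3) < len - i := by omega
theorem pv_dec2 (len i k : Nat) (h : i + 2 < len) : len - (i + 3 + 3 * k + 3) < len - i := by omega

-- codon = frame_seq[i:i+3]  (both indices are nonnegative, so slice = drop/take)
def pvCodon (s : List Char) (i : Nat) : List Char := (s.drop i).take 3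

def pvStartCodons : List (List Char) := ["ATG".toList]
def pvStopCodons : List (List Char) := ["TAA".toList, "TAG".toList, "TGA".toList]

-- A's inner `while j < len - 2, j += 3` search for a stop codon, started at j;
-- returns the number of 3-steps taken until the stop (stop is at j + 3*k), none if it breaks out.
def pvAInner (s : List Char) (j : Nat) : Option Nat :=
  if j + 2 < s.length then
    if (pvCodon s j).length = 3 ∧ pvCodon s j ∈ pvStopCodons then some 0
    else (pvAInner s (j + 3)).map (· + 1)
  else none
termination_by s.length - j
decreasing_by exact pv_dec1 _ _ ‹_›

-- A's outer `while i < len - 2` loop over one frame, threading (max_orf_length, num_orfs).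
def pvAOuter (s : List Char) (i : Nat) (maxL num : Int) : Int × Int :=
  if i + 2 < s.length then
    if (pvCodon s i).length = 3 ∧ pvCodon s i ∈ pvStartCodons then
      match pvAInner s (i + 3) with
      | some k =>
          -- stop found at j = i + 3 + 3*k; orf_length = j - i + 3; i = j + 3
          pvAOuter s (i + 3 + 3 * k + 3)
            (max maxL (((i + 3 + 3 * k : Nat) : Int) - (i : Int) + 3)) (num + 1)
      | none => pvAOuter s (i + 3) maxL num
    else pvAOuter s (i + 3) maxL num
  else (maxL, num)
termination_by s.length - i
decreasing_by all_goals first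
  | exact pv_dec1 _ _ ‹_›
  | exact pv_dec2 _ _ _ ‹_›

def analyze_orfs_py (sequence : String) : List Int :=
  let l := sequence.toList
  let r0 := pvAOuter (l.drop 0) 0 0 0
  let r1 := pvAOuter (l.drop 1) 0 r0.1 r0.2
  let r2 := pvAOuter (l.drop 2) 0 r1.1 r1.2
  [r2.1, r2.2]

-- ===== PORT B =====
-- one linear pass over a frame: `st` is the position of the opening ATG of the
-- currently open ORF (None if no ORF is open)  — B's `for i in range(0, len-2, 3)` loop
def pvBLoop (s : List Char) (i : Nat) (st : Option Nat) (maxL num : Int) : Int × Int :=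
  if i + 2 < s.length then
    match st with
    | none => pvBLoop s (i + 3) (if pvCodon s i = "ATG".toList then some i else none) maxL num
    | some a =>
        if pvCodon s i = "TAA".toList ∨ pvCodon s i = "TAG".toList ∨ pvCodon s i = "TGA".toList then
          pvBLoop s (i + 3) none (max maxL ((i : Int) - (a : Int) + 3)) (num + 1)
        else pvBLoop s (i + 3) (some a) maxL num
  else (maxL, num)
termination_by s.length - i
decreasing_by all_goals first
  | exact pv_dec1 _ _ ‹_›
  | exact pv_dec2 _ _ _ ‹_›

def analyze_orfs_py_alt (sequence : String) : List Int :=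
  let l := sequence.toList
  let r0 := pvBLoop (l.drop 0) 0 none 0 0
  let r1 := pvBLoop (l.drop 1) 0 none r0.1 r0.2
  let r2 := pvBLoop (l.drop 2) 0 none r1.1 r1.2
  [r2.1, r2.2]

-- ===== PRECONDITION & SPEC =====
def Spec_analyze_orfs_py (sequence : String) (out : List Int) : Prop := out = analyze_orfs_py_alt sequence
instance (sequence : String) (out : List Int) : Decidable (Spec_analyze_orfs_py sequence out) := by unfold Spec_analyze_orfs_py; infer_instance

-- ===== CLAIM (what is proved, stated in full; the proofs are below) =====
def Claim_equal_analyze_orfs_py : Prop := ∀ (sequence : String), Dom_analyze_orfs_py sequence → Spec_analyze_orfs_py sequence (analyze_orfs_py sequence)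

-- ===== LEMMAS AND PROOFS =====

theorem pv_stop_mem_iff (c : List Char) :
    c ∈ pvStopCodons ↔ (c = "TAA".toList ∨ c = "TAG".toList ∨ c = "TGA".toList) := by
  simp [pvStopCodons]

theorem pv_stop_len (c : List Char)
    (h : c = "TAA".toList ∨ c = "TAG".toList ∨ c = "TGA".toList) : c.length = 3 := by
  rcases h with h | h | h <;> subst h <;> decide

theorem pv_start_iff (c : List Char) :
    (c.length = 3 ∧ c ∈ pvStartCodons) ↔ c = "ATG".toList := by
  constructor
  · rintro ⟨_, h⟩; simpa [pvStartCodons] using h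
  · intro h; subst h; exact ⟨by decide, by simp [pvStartCodons]⟩

theorem pvBLoop_some (s : List Char) (i a : Nat) (maxL num : Int) (hg : i + 2 < s.length) :
    pvBLoop s i (some a) maxL num =
      if pvCodon s i = "TAA".toList ∨ pvCodon s i = "TAG".toList ∨ pvCodon s i = "TGA".toList then
        pvBLoop s (i + 3) none (max maxL ((i : Int) - (a : Int) + 3)) (num + 1)
      else pvBLoop s (i + 3) (some a) maxL num := by
  conv_lhs => rw [pvBLoop]
  rw [if_pos hg]

theorem pvAInner_none_succ (s : List Char) (j : Nat)
    (h : pvAInner s j = none) : pvAInner s (j + 3) = none := by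
  rw [pvAInner] at h
  split at h
  · split at h
    · exact absurd h (by simp)
    · simpa using h
  · rw [pvAInner]; split
    · omega
    · rfl

theorem pv_stuckA (s : List Char) (i : Nat) (maxL num : Int)
    (h : pvAInner s i = none) : pvAOuter s i maxL num = (maxL, num) := by
  fun_induction pvAOuter s i maxL num with
  | case1 i maxL num hg hs k hk ih =>
      exact absurd hk (by simp [pvAInner_none_succ s i h])
  | case2 i maxL num hg hs hk ih => exact ih (pvAInner_none_succ s i h)
  | case3 i maxL num hg hs ih => exact ih (pvAInner_none_succ s i h)
  | case4 => rfl

theorem pv_stuckB (s : List Char) (i : Nat) (st : Option Nat) (maxL num : Int)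
    (h : pvAInner s i = none) : pvBLoop s i st maxL num = (maxL, num) := by
  fun_induction pvBLoop s i st maxL num with
  | case1 i maxL num hg ih => exact ih (pvAInner_none_succ s i h)
  | case2 i maxL num hg a hstop ih =>
      -- a stop codon at i contradicts pvAInner s i = none
      rw [pvAInner] at h
      rw [if_pos hg] at h
      rw [if_pos ⟨pv_stop_len _ hstop, (pv_stop_mem_iff _).mpr hstop⟩] at h
      exact absurd h (by simp)
  | case3 i maxL num hg a hstop ih => exact ih (pvAInner_none_succ s i h)
  | case4 => rfl

theorem pv_stopLemma (s : List Char) (k : Nat) :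
    ∀ (j st : Nat) (maxL num : Int), pvAInner s j = some k →
      pvBLoop s j (some st) maxL num =
        pvBLoop s (j + 3 * k + 3) none
          (max maxL (((j + 3 * k : Nat) : Int) - (st : Int) + 3)) (num + 1) := by
  induction k with
  | zero =>
      intro j st maxL num h
      rw [pvAInner] at h
      split at h
      · rename_i hg
        split at h
        · rename_i hstop
          rw [pvBLoop_some s j st maxL num hg,
            if_pos ((pv_stop_mem_iff _).mp hstop.2)]
          norm_num
        · exact absurd h (by
            intro hc
            rcases Option.map_eq_some_iff.mp hc with ⟨a, _, ha⟩
            omega)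
      · exact absurd h (by simp)
  | succ k ih =>
      intro j st maxL num h
      rw [pvAInner] at h
      split at h
      · rename_i hg
        split at h
        · exact absurd h (by simp)
        · rename_i hnstop
          rcases Option.map_eq_some_iff.mp h with ⟨a, ha, hak⟩
          have ha' : pvAInner s (j + 3) = some k := by
            have : a = k := by omega
            rw [← this]; exact ha
          have hnot : ¬ (pvCodon s j = "TAA".toList ∨ pvCodon s j = "TAG".toList ∨
              pvCodon s j = "TGA".toList) := by
            intro hd
            exact hnstop ⟨pv_stop_len _ hd, (pv_stop_mem_iff _).mpr hd⟩
          rw [pvBLoop_some s j st maxL num hg, if_neg hnot,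
            ih (j + 3) st maxL num ha']
          have heq : j + 3 + 3 * k = j + 3 * (k + 1) := by omega
          rw [heq]
      · exact absurd h (by simp)

theorem pv_main (s : List Char) (i : Nat) (maxL num : Int) :
    pvAOuter s i maxL num = pvBLoop s i none maxL num := by
  fun_induction pvAOuter s i maxL num with
  | case1 i maxL num hg hs k hk ih =>
      rw [pvBLoop, if_pos hg]
      rw [if_pos ((pv_start_iff _).mp hs)]
      rw [pv_stopLemma s k (i + 3) i maxL num hk]
      rw [ih]
  | case2 i maxL num hg hs hk ih =>
      rw [pvBLoop, if_pos hg]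
      rw [if_pos ((pv_start_iff _).mp hs)]
      rw [pv_stuckA s (i + 3) maxL num hk, pv_stuckB s (i + 3) (some i) maxL num hk]
  | case3 i maxL num hg hs ih =>
      rw [pvBLoop, if_pos hg]
      have : ¬ pvCodon s i = "ATG".toList := fun h => hs ((pv_start_iff _).mpr h)
      rw [if_neg this]
      exact ih
  | case4 i maxL num hg =>
      rw [pvBLoop, if_neg hg]

-- ===== VERDICT (by name: the statement is the Claim_ definition above) =====
theorem analyze_orfs_py_spec : Claim_equal_analyze_orfs_py := by
  intro sequence _
  unfold Spec_analyze_orfs_py analyze_orfs_py analyze_orfs_py_alt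
  simp only [pv_main]
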